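-- pv_equiv track=rewrite | github.com/nathan-roe/github-project-summary | src/project_summary/lang_color_extractor.py | parse_language_type_and_color
-- ===== SOURCE A (Python) =====
-- from typing import Optional
--
-- def _strip_inline_comment(s: str) -> str:
--     """
--     Remove inline comments that start with #, but only when # is not inside quotes.
--     """
--     in_single = False
--     in_double = False
--     for i, ch in enumerate(s):
--         if ch == "'" and not in_double:
--             in_single = not in_single
--         elif ch == '"' and not in_single:
--             in_double = not in_double
--         elif ch == "#" and not in_single and not in_double:
--             return s[:i].rstrip()
--     return s.rstrip()
--
-- def _unquote(s: str) -> str: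
--     s = s.strip()
--     if len(s) >= 2 and ((s[0] == s[-1] == '"') or (s[0] == s[-1] == "'")):
--         return s[1:-1]
--     return s
--
-- def parse_language_type_and_color(yml_text: str) -> dict[str, dict[str, Optional[str]]]:
--     """
--     Returns: {language_name: {"type": <str|None>, "color": <str|None>}, ...}
--     """
--     languages: dict[str, dict[str, Optional[str]]] = {}
--
--     current_lang: Optional[str] = None
--
--     for raw_line in yml_text.splitlines():
--         line = raw_line.rstrip("\n")
--
--         # Skip YAML document marker and empty lines
--         stripped = line.strip()
--         if not stripped or stripped == "---":
--             continue
--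
--         # Skip full-line comments (allow leading spaces)
--         if stripped.startswith("#"):
--             continue
--
--         # Top-level key: "Language Name:"
--         if line and not line[0].isspace() and stripped.endswith(":"):
--             lang_name = stripped[:-1].strip()
--             current_lang = lang_name
--             languages.setdefault(current_lang, {"type": None, "color": None})
--             continue
--
--         # If we're not inside a language block, ignore
--         if current_lang is None:
--             continue
--
--         # We only care about fields at indentation level 2: "  type: ..." / "  color: ..."
--         if line.startswith("  ") and not line.startswith("    "):
--             no_comment = _strip_inline_comment(line.strip())
--             if ":" not in no_comment:
--                 continue
--
--             key, value = no_comment.split(":", 1)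
--             key = key.strip()
--             value = _unquote(value.strip()) if value.strip() else ""
--
--             if key == "type":
--                 languages[current_lang]["type"] = value or None
--             elif key == "color":
--                 languages[current_lang]["color"] = value or None
--
--     return languages
-- ===== SOURCE B (Python) =====
-- from typing import Optional
--
-- def _strip_inline_comment(s: str) -> str:
--     in_single = False
--     in_double = False
--     for i, ch in enumerate(s):
--         if ch == "'" and not in_double:
--             in_single = not in_single
--         elif ch == '"' and not in_single:
--             in_double = not in_double
--         elif ch == "#" and not in_single and not in_double:
--             return s[:i].rstrip()
--     return s.rstrip()
--
-- def _unquote(s: str) -> str: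
--     s = s.strip()
--     if len(s) >= 2 and ((s[0] == s[-1] == '"') or (s[0] == s[-1] == "'")):
--         return s[1:-1]
--     return s
--
-- def parse_language_type_and_color(yml_text: str) -> dict[str, dict[str, Optional[str]]]:
--     # Pass 1: group the indentation-2 field lines into one block per language
--     # (first-seen order; a recurring language name reuses its existing block).
--     blocks: dict[str, list[str]] = {}
--     current: Optional[str] = None
--     for line in yml_text.splitlines():
--         stripped = line.strip()
--         if not stripped or stripped == "---" or stripped.startswith("#"):
--             continue
--         if not line[0].isspace() and stripped.endswith(":"):
--             current = stripped[:-1].strip()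
--             blocks.setdefault(current, [])
--         elif current is not None and line.startswith("  ") and not line.startswith("    "):
--             blocks[current].append(stripped)
--     # Pass 2: reduce each block to its type/color pair.
--     result: dict[str, dict[str, Optional[str]]] = {}
--     for lang, lines in blocks.items():
--         t = c = None
--         for s in lines:
--             no_comment = _strip_inline_comment(s)
--             if ":" not in no_comment:
--                 continue
--             key, value = no_comment.split(":", 1)
--             key = key.strip()
--             value = _unquote(value.strip()) if value.strip() else ""
--             if key == "type":
--                 t = value or None
--             elif key == "color":
--                 c = value or None
--         result[lang] = {"type": t, "color": c}
--     return result
-- ===== Notes on version B (the rewrite author's own statement) =====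
-- stated objective: alternative
-- what changed: A's single pass that mutates a nested dict field-by-field via setdefault is replaced by a two-pass design: pass 1 groups the indentation-2 field lines into one block per language (first-seen order, recurring names reuse their block), pass 2 reduces each block to its type/color pair with a plain two-slot accumulator; the comment/quote helpers are unchanged.
import Mathlib
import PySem

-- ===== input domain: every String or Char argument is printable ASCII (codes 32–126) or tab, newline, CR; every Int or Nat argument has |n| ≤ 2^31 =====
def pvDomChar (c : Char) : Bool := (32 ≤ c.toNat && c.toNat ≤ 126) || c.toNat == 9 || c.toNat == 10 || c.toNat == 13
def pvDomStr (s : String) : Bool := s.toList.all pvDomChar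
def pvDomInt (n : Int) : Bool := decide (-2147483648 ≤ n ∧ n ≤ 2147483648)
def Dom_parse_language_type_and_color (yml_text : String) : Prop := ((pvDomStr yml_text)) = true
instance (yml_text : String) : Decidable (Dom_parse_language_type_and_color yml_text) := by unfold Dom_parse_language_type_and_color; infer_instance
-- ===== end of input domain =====

-- B replaces A's single pass mutating a nested dict with a two-pass design (group field
-- lines per language, then reduce each block to its type/color pair); objective: alternative.

-- ===== PORT A =====
-- _strip_inline_comment: the enumerate loop, carrying the consumed prefix (s[:i]) as `acc`.
def pvSicGo : List Char → Bool → Bool → List Char → List Char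
  | [], _, _, acc => PySem.Chars.rstrip acc
  | ch :: rest, inS, inD, acc =>
    if ch == '\'' && !inD then pvSicGo rest (!inS) inD (acc ++ [ch])
    else if ch == '"' && !inS then pvSicGo rest inS (!inD) (acc ++ [ch])
    else if ch == '#' && !inS && !inD then PySem.Chars.rstrip acc
    else pvSicGo rest inS inD (acc ++ [ch])

def pvStripInlineComment (s : List Char) : List Char := pvSicGo s false false []

-- _unquote (shared by both Pythons)
def pvUnquote (s0 : List Char) : List Char :=
  let s := PySem.Chars.strip s0
  if decide (2 ≤ s.length) &&
      ((s.headI == '"' && s.getLastI == '"') || (s.headI == '\'' && s.getLastI == '\'')) then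
    PySem.List.slice s (some 1) (some (-1))    -- s[1:-1]
  else s

-- A's loop body; state = (languages, current_lang)
def pvStepA (st : PySem.Dict String (PySem.Dict String (Option String)) × Option String)
    (raw : List Char) : PySem.Dict String (PySem.Dict String (Option String)) × Option String :=
  let line := (raw.reverse.dropWhile (fun c => c == '\n')).reverse   -- raw_line.rstrip("\n"): exact
  let stripped := PySem.Chars.strip line
  if stripped.isEmpty || stripped == "---".toList then st
  else if PySem.Chars.startswith stripped "#".toList then st
  else if !line.isEmpty && !(PySem.Chars.isspace line.headI) && PySem.Chars.endswith stripped ":".toList then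
    let langName := String.ofList (PySem.Chars.strip stripped.dropLast)   -- stripped[:-1]
    (st.1.setdefault langName (PySem.Dict.ofList [("type", none), ("color", none)]), some langName)
  else
    match st.2 with
    | none => st
    | some cur =>
      if PySem.Chars.startswith line "  ".toList && !(PySem.Chars.startswith line "    ".toList) then
        let noComment := pvStripInlineComment (PySem.Chars.strip line)
        if !(PySem.Chars.isIn ":".toList noComment) then st
        else
          let parts := PySem.Chars.splitOnMax noComment ":".toList 1    -- no_comment.split(":", 1)
          let key := String.ofList (PySem.Chars.strip (PySem.List.pyGetD parts 0 []))
          let vstr := PySem.Chars.strip (PySem.List.pyGetD parts 1 []) -- value.strip(); parts[1] exists: ":" in no_comment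
          let value := if vstr.isEmpty then ([] : List Char) else pvUnquote vstr
          let v : Option String := if value.isEmpty then none else some (String.ofList value)  -- value or None
          if key == "type" then
            match st.1.get? cur with
            | some inner => (st.1.insert cur (inner.insert "type" v), st.2)
            | none => st   -- unreachable: current_lang is always a key of languages
          else if key == "color" then
            match st.1.get? cur with
            | some inner => (st.1.insert cur (inner.insert "color" v), st.2)
            | none => st   -- unreachable
          else st
      else st

def parse_language_type_and_color (yml_text : String) : List (String × List (String × Option String)) :=
  let st := ((PySem.Str.splitlines yml_text).map String.toList).foldl pvStepA (PySem.Dict.empty, none)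
  st.1.items.map (fun p => (p.1, p.2.items))

-- ===== PORT B =====
-- pass-2 inner loop body: one field line updates the (type, color) accumulator
def pvFieldStep (tc : Option String × Option String) (s : List Char) : Option String × Option String :=
  let noComment := pvStripInlineComment s
  if !(PySem.Chars.isIn ":".toList noComment) then tc
  else
    let parts := PySem.Chars.splitOnMax noComment ":".toList 1
    let key := String.ofList (PySem.Chars.strip (PySem.List.pyGetD parts 0 []))
    let vstr := PySem.Chars.strip (PySem.List.pyGetD parts 1 [])
    let value := if vstr.isEmpty then ([] : List Char) else pvUnquote vstr
    let v : Option String := if value.isEmpty then none else some (String.ofList value)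
    if key == "type" then (v, tc.2)
    else if key == "color" then (tc.1, v)
    else tc

-- pass-1 loop body: group field lines into per-language blocks; state = (blocks, current)
def pvStepB (st : PySem.Dict String (List (List Char)) × Option String) (line : List Char) :
    PySem.Dict String (List (List Char)) × Option String :=
  let stripped := PySem.Chars.strip line
  if stripped.isEmpty || stripped == "---".toList || PySem.Chars.startswith stripped "#".toList then st
  else if !(PySem.Chars.isspace line.headI) && PySem.Chars.endswith stripped ":".toList then
    let cur := String.ofList (PySem.Chars.strip stripped.dropLast)
    (st.1.setdefault cur [], some cur)
  else
    match st.2 with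
    | none => st
    | some cur =>
      if PySem.Chars.startswith line "  ".toList && !(PySem.Chars.startswith line "    ".toList) then
        (st.1.modify cur [] (fun ls => ls ++ [stripped]), st.2)  -- blocks[current].append(stripped); key always present
      else st

def parse_language_type_and_color_alt (yml_text : String) : List (String × List (String × Option String)) :=
  let blocks := ((PySem.Str.splitlines yml_text).map String.toList).foldl pvStepB (PySem.Dict.empty, none)
  let result := blocks.1.items.foldl
    (fun r p =>
      let tc := p.2.foldl pvFieldStep (none, none)
      r.insert p.1 (PySem.Dict.ofList [("type", tc.1), ("color", tc.2)]))
    (PySem.Dict.empty : PySem.Dict String (PySem.Dict String (Option String)))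
  result.items.map (fun q => (q.1, q.2.items))

-- ===== PRECONDITION & SPEC =====
def Spec_parse_language_type_and_color (yml_text : String) (out : List (String × List (String × Option String))) : Prop := out = parse_language_type_and_color_alt yml_text
instance (yml_text : String) (out : List (String × List (String × Option String))) : Decidable (Spec_parse_language_type_and_color yml_text out) := by unfold Spec_parse_language_type_and_color; infer_instance

-- ===== CLAIM (what is proved, stated in full; the proofs are below) =====
def Claim_equal_parse_language_type_and_color : Prop := ∀ (yml_text : String), Dom_parse_language_type_and_color yml_text → Spec_parse_language_type_and_color yml_text (parse_language_type_and_color yml_text)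

-- ===== LEMMAS AND PROOFS =====

-- B's pass-2 reduction of a block, and the nested dict A keeps for a block with that reduction
def pvProcB (ls : List (List Char)) : Option String × Option String := ls.foldl pvFieldStep (none, none)

def pvInner (tc : Option String × Option String) : PySem.Dict String (Option String) :=
  PySem.Dict.ofList [("type", tc.1), ("color", tc.2)]

def pvAmk (d : PySem.Dict String (List (List Char))) : PySem.Dict String (PySem.Dict String (Option String)) :=
  PySem.Dict.mk (d.items.map (fun p => (p.1, pvInner (pvProcB p.2))))

theorem pvInner_eq_mk (tc : Option String × Option String) :
    pvInner tc = PySem.Dict.mk [("type", tc.1), ("color", tc.2)] := by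
  simp [pvInner, PySem.Dict.ofList, PySem.Dict.update, PySem.Dict.insert, PySem.Dict.contains,
    PySem.Dict.empty]

theorem pvAmk_contains (d : PySem.Dict String (List (List Char))) (k : String) :
    (pvAmk d).contains k = d.contains k := by
  simp [pvAmk, PySem.Dict.contains, List.any_map, Function.comp_def]

theorem pvAmk_keys (d : PySem.Dict String (List (List Char))) :
    (pvAmk d).keys = d.keys := by
  simp [pvAmk, PySem.Dict.keys, List.map_map, Function.comp_def]

theorem pvAmk_get? (d : PySem.Dict String (List (List Char))) (k : String) :
    (pvAmk d).get? k = (d.get? k).map (fun ls => pvInner (pvProcB ls)) := by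
  simp [pvAmk, PySem.Dict.get?, List.find?_map, Function.comp_def, Option.map_map]

theorem pvAmk_insert (d : PySem.Dict String (List (List Char))) (k : String) (w : List (List Char))
    (h : d.contains k = true) :
    pvAmk (d.insert k w) = (pvAmk d).insert k (pvInner (pvProcB w)) := by
  have h2 : (pvAmk d).contains k = true := by rw [pvAmk_contains]; exact h
  apply PySem.Dict.ext
  show ((d.insert k w).items.map (fun p => (p.1, pvInner (pvProcB p.2)))) = _
  rw [PySem.Dict.items_insert_of_contains _ _ h, PySem.Dict.items_insert_of_contains _ _ h2]
  show _ = List.map _ (d.items.map (fun p => (p.1, pvInner (pvProcB p.2))))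
  rw [List.map_map, List.map_map]
  apply List.map_congr_left
  intro p _
  by_cases hpk : p.1 = k <;> simp [hpk]

theorem pvAmk_setdefault (d : PySem.Dict String (List (List Char))) (k : String) :
    pvAmk (d.setdefault k []) = (pvAmk d).setdefault k (pvInner (none, none)) := by
  by_cases hc : d.contains k = true
  · rw [PySem.Dict.setdefault_of_contains _ _ hc,
      PySem.Dict.setdefault_of_contains _ _ (by rw [pvAmk_contains]; exact hc)]
  · rw [PySem.Dict.setdefault_of_not_contains _ _ (by simpa using hc),
      PySem.Dict.setdefault_of_not_contains _ _
        (by rw [pvAmk_contains]; simpa using hc)]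
    apply PySem.Dict.ext
    show ((d.insert k []).items.map (fun p => (p.1, pvInner (pvProcB p.2)))) = _
    rw [PySem.Dict.items_insert_of_not_contains _ _ (by simpa using hc),
      PySem.Dict.items_insert_of_not_contains _ _ (by rw [pvAmk_contains]; simpa using hc)]
    show List.map _ (d.items ++ [(k, [])]) = (d.items.map (fun p => (p.1, pvInner (pvProcB p.2)))) ++ _
    rw [List.map_append]
    rfl

-- replacing each entry keyed k of a duplicate-free association list by its first k-value is the identity
theorem pv_map_replace_self {ν : Type} (l : List (String × ν)) (k : String) (v : ν)
    (hnd : (l.map (fun p => p.1)).Nodup)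
    (h : (l.find? (fun p => p.1 == k)).map (fun p => p.2) = some v) :
    l.map (fun p => if (p.1 == k) = true then (k, v) else p) = l := by
  induction l with
  | nil => simp at h
  | cons p t ih =>
    simp only [List.map_cons, List.nodup_cons] at hnd
    by_cases hpk : p.1 = k
    · subst hpk
      rw [List.find?_cons_of_pos (by simp)] at h
      simp only [Option.map_some, Option.some.injEq] at h
      subst h
      have hall : ∀ q ∈ p :: t,
          (fun q => if (q.1 == p.1) = true then (p.1, p.2) else q) q = id q := by
        intro q hq
        rcases List.mem_cons.mp hq with rfl | hq
        · simp
        · have hqk : q.1 ≠ p.1 := fun e => hnd.1 (e ▸ List.mem_map_of_mem hq)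
          simp [hqk]
      rw [List.map_congr_left hall, List.map_id]
    · rw [List.find?_cons_of_neg (by simp [hpk])] at h
      simp only [List.map_cons]
      rw [ih hnd.2 h]
      simp [hpk]

-- inserting the value already present at an existing key changes nothing (needs unique keys)
theorem pv_insert_self {ν : Type} (d : PySem.Dict String ν) (k : String) (v : ν)
    (hnd : d.keys.Nodup) (h : d.get? k = some v) : d.insert k v = d := by
  have hc : d.contains k = true := by
    rw [PySem.Dict.contains_eq_isSome_get?, h]; rfl
  apply PySem.Dict.ext
  rw [PySem.Dict.items_insert_of_contains _ _ hc]
  exact pv_map_replace_self d.items k v hnd h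

theorem pvInner_insert_type (tc : Option String × Option String) (v : Option String) :
    (pvInner tc).insert "type" v = pvInner (v, tc.2) := by
  simp [pvInner_eq_mk, PySem.Dict.insert, PySem.Dict.contains]

theorem pvInner_insert_color (tc : Option String × Option String) (v : Option String) :
    (pvInner tc).insert "color" v = pvInner (tc.1, v) := by
  simp [pvInner_eq_mk, PySem.Dict.insert, PySem.Dict.contains]

-- invariant carried through pass 1 of B
def pvInv (st : PySem.Dict String (List (List Char)) × Option String) : Prop :=
  st.1.keys.Nodup ∧ ∀ c, st.2 = some c → st.1.contains c = true

theorem pvStepB_inv (st : PySem.Dict String (List (List Char)) × Option String) (line : List Char)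
    (h : pvInv st) : pvInv (pvStepB st line) := by
  obtain ⟨d, cur⟩ := st
  obtain ⟨hnd, hcont⟩ := h
  unfold pvStepB
  simp only []
  split
  · exact ⟨hnd, hcont⟩
  · split
    · refine ⟨?_, ?_⟩
      · rw [PySem.Dict.keys_setdefault]
        split
        · exact hnd
        · next hnc =>
          exact List.Nodup.append hnd (List.nodup_singleton _)
            (by simpa [List.disjoint_singleton,
              ← PySem.Dict.contains_iff_mem_keys] using hnc)
      · intro c hc
        simp only [Option.some.injEq] at hc
        rw [PySem.Dict.contains_setdefault]
        simp [hc]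
    · cases cur with
      | none => exact ⟨hnd, by simp⟩
      | some c =>
        have hck : d.contains c = true := hcont c rfl
        show pvInv (if (PySem.Chars.startswith line "  ".toList
            && !(PySem.Chars.startswith line "    ".toList)) = true then _ else _)
        split
        · refine ⟨?_, ?_⟩
          · rw [PySem.Dict.keys_modify, PySem.Dict.keys_insert_of_contains _ _ hck]
            exact hnd
          · intro c' hc'
            simp only [Option.some.injEq] at hc'
            rw [PySem.Dict.contains_modify]
            simp [hc']
        · exact ⟨hnd, fun c' hc' => by
            simp only [Option.some.injEq] at hc'; subst hc'; exact hck⟩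

-- one line: A's step mirrors B's step through pvAmk
theorem pvStep_mirror (d : PySem.Dict String (List (List Char))) (cur : Option String)
    (raw : List Char) (hn : '\n' ∉ raw) (hinv : pvInv (d, cur)) :
    pvStepA (pvAmk d, cur) raw = (pvAmk (pvStepB (d, cur) raw).1, (pvStepB (d, cur) raw).2) := by
  obtain ⟨hnd, hcont⟩ := hinv
  simp only at hnd hcont
  have hline : (raw.reverse.dropWhile (fun c => c == '\n')).reverse = raw := by
    rw [List.dropWhile_eq_self_iff.mpr, List.reverse_reverse]
    intro hl hp
    exact hn (List.mem_reverse.mp ((eq_of_beq hp) ▸ List.getElem_mem hl))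
  unfold pvStepA pvStepB
  simp only [hline]
  set s0 := PySem.Chars.strip raw with hs0
  by_cases h1 : (s0.isEmpty || s0 == "---".toList) = true
  · rw [if_pos h1, if_pos (by rw [Bool.or_eq_true]; exact Or.inl h1)]
  · rw [if_neg h1]
    by_cases h2 : PySem.Chars.startswith s0 "#".toList = true
    · rw [if_pos h2, if_pos (by rw [Bool.or_eq_true]; exact Or.inr h2)]
    · rw [if_neg h2,
        if_neg (show ¬(s0.isEmpty || s0 == "---".toList
            || PySem.Chars.startswith s0 "#".toList) = true from by
          rw [Bool.or_eq_true]; rintro (h | h) <;> [exact h1 h; exact h2 h])]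
      have hs0ne : s0.isEmpty = false := by
        rcases Bool.eq_false_iff.mpr h1 with h1'
        simp at h1'
        simp [h1'.1]
      have hrne : raw ≠ [] := by
        intro e
        rw [hs0, e, show PySem.Chars.strip ([] : List Char) = [] from rfl] at hs0ne
        simp at hs0ne
      have hrawE : raw.isEmpty = false := by
        cases hr : raw with
        | nil => exact absurd hr hrne
        | cons a t => simp
      rw [show (!raw.isEmpty && !PySem.Chars.isspace raw.headI
            && PySem.Chars.endswith s0 ":".toList)
          = (!PySem.Chars.isspace raw.headI && PySem.Chars.endswith s0 ":".toList) by
        rw [hrawE]; simp]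
      by_cases h3 : (!PySem.Chars.isspace raw.headI && PySem.Chars.endswith s0 ":".toList) = true
      · rw [if_pos h3, if_pos h3, pvAmk_setdefault]
        rfl
      · rw [if_neg h3, if_neg h3]
        cases cur with
        | none => rfl
        | some c =>
          show _ = (pvAmk (if (PySem.Chars.startswith raw "  ".toList
              && !PySem.Chars.startswith raw "    ".toList) = true
              then ((d.modify c [] fun ls => ls ++ [s0]), some c) else (d, some c)).1,
            (if (PySem.Chars.startswith raw "  ".toList
              && !PySem.Chars.startswith raw "    ".toList) = true
              then ((d.modify c [] fun ls => ls ++ [s0]), some c) else (d, some c)).2)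
          split
          next x heq => exact absurd heq (by simp)
          next x c1 heq =>
          replace heq : c1 = c := by injection heq with h; exact h.symm
          rw [heq]
          by_cases h4 : (PySem.Chars.startswith raw "  ".toList
              && !PySem.Chars.startswith raw "    ".toList) = true
          · rw [if_pos h4, if_pos h4]
            have hc : d.contains c = true := hcont c rfl
            have hex : (d.get? c).isSome := by
              rw [← PySem.Dict.contains_eq_isSome_get?]; exact hc
            obtain ⟨ls, hget⟩ := Option.isSome_iff_exists.mp hex
            have hgA : (pvAmk d).get? c = some (pvInner (pvProcB ls)) := by
              rw [pvAmk_get?, hget]; rfl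
            have hAnodup : (pvAmk d).keys.Nodup := by rw [pvAmk_keys]; exact hnd
            rw [PySem.Dict.modify, PySem.Dict.getD_of_get?_eq_some _ _ hget,
              pvAmk_insert _ _ _ hc]
            have hproc : pvProcB (ls ++ [s0]) = pvFieldStep (pvProcB ls) s0 := by
              simp [pvProcB]
            rw [hproc]
            unfold pvFieldStep
            simp only []
            by_cases h5 : PySem.Chars.isIn ":".toList (pvStripInlineComment s0) = true
            · rw [if_neg (show ¬(!PySem.Chars.isIn ":".toList (pvStripInlineComment s0)) = true
                  from by rw [h5]; decide),
                if_neg (show ¬(!PySem.Chars.isIn ":".toList (pvStripInlineComment s0)) = true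
                  from by rw [h5]; decide)]
              set key := String.ofList (PySem.Chars.strip (PySem.List.pyGetD
                (PySem.Chars.splitOnMax (pvStripInlineComment s0) ":".toList 1) 0 [])) with hkey
              by_cases h6 : (key == "type") = true
              · rw [if_pos h6, if_pos h6]
                simp only [hgA]
                rw [pvInner_insert_type]
              · rw [if_neg h6, if_neg h6]
                by_cases h7 : (key == "color") = true
                · rw [if_pos h7, if_pos h7]
                  simp only [hgA]
                  rw [pvInner_insert_color]
                · rw [if_neg h7, if_neg h7, pv_insert_self _ _ _ hAnodup hgA]
            · rw [if_pos (show (!PySem.Chars.isIn ":".toList (pvStripInlineComment s0)) = true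
                  from by rw [Bool.eq_false_iff.mpr h5]; decide),
                if_pos (show (!PySem.Chars.isIn ":".toList (pvStripInlineComment s0)) = true
                  from by rw [Bool.eq_false_iff.mpr h5]; decide),
                pv_insert_self _ _ _ hAnodup hgA]
          · rw [if_neg h4, if_neg h4]

theorem pvFold_mirror (lines : List (List Char)) (st : PySem.Dict String (List (List Char)) × Option String)
    (hn : ∀ l ∈ lines, '\n' ∉ l) (hinv : pvInv st) :
    lines.foldl pvStepA (pvAmk st.1, st.2) =
      (pvAmk (lines.foldl pvStepB st).1, (lines.foldl pvStepB st).2) := by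
  induction lines generalizing st with
  | nil => rfl
  | cons l t ih =>
    simp only [List.foldl_cons]
    rw [pvStep_mirror st.1 st.2 l (hn l (by simp)) hinv]
    exact ih _ (fun l' hl' => hn l' (by simp [hl'])) (pvStepB_inv _ _ hinv)

theorem pvFold_inv (lines : List (List Char)) (st : PySem.Dict String (List (List Char)) × Option String)
    (hinv : pvInv st) : pvInv (lines.foldl pvStepB st) := by
  induction lines generalizing st with
  | nil => exact hinv
  | cons l t ih => exact ih _ (pvStepB_inv _ _ hinv)

-- no line produced by splitlines contains '\n'
theorem pvGo_no_break (isB : Char → Bool) (s cur : List Char) (acc : List (List Char))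
    (hisB : isB '\n' = true)
    (hcur : '\n' ∉ cur) (hacc : ∀ l ∈ acc, '\n' ∉ l) :
    ∀ l ∈ PySem.Chars.splitlines.go isB s cur acc, '\n' ∉ l := by
  revert hcur hacc
  fun_induction PySem.Chars.splitlines.go isB s cur acc with
  | case1 cur acc h =>
    intro hcur hacc l hl
    exact hacc l (List.mem_reverse.mp hl)
  | case2 cur acc h =>
    intro hcur hacc l hl
    rcases List.mem_cons.mp (List.mem_reverse.mp hl) with rfl | hm
    · exact fun hx => hcur (List.mem_reverse.mp hx)
    · exact hacc l hm
  | case3 rest cur acc ih =>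
    intro hcur hacc
    refine ih (by simp) ?_
    intro l hl
    rcases List.mem_cons.mp hl with rfl | hm
    · exact fun hx => hcur (List.mem_reverse.mp hx)
    · exact hacc l hm
  | case4 c rest cur acc hne hb ih =>
    intro hcur hacc
    refine ih (by simp) ?_
    intro l hl
    rcases List.mem_cons.mp hl with rfl | hm
    · exact fun hx => hcur (List.mem_reverse.mp hx)
    · exact hacc l hm
  | case5 c rest cur acc hne hb ih =>
    intro hcur hacc
    refine ih ?_ hacc
    intro hx
    rcases List.mem_cons.mp hx with h | hm
    · exact absurd (h ▸ hisB) (by simpa using hb)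
    · exact hcur hm

theorem pv_splitlines_no_newline (s : List Char) :
    ∀ l ∈ PySem.Chars.splitlines s, '\n' ∉ l := by
  unfold PySem.Chars.splitlines
  exact pvGo_no_break _ s [] [] (by decide) (by simp) (by simp)

-- ===== VERDICT (by name: the statement is the Claim_ definition above) =====
theorem parse_language_type_and_color_spec : Claim_equal_parse_language_type_and_color := by
  unfold Claim_equal_parse_language_type_and_color
  intro s _dom
  unfold Spec_parse_language_type_and_color
  unfold parse_language_type_and_color parse_language_type_and_color_alt
  simp only []
  set lines := (PySem.Str.splitlines s).map String.toList with hl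
  have hno : ∀ l ∈ lines, '\n' ∉ l := by
    rw [hl, PySem.Str.splitlines_map_toList]
    exact pv_splitlines_no_newline s.toList
  have hinv0 : pvInv ((PySem.Dict.empty : PySem.Dict String (List (List Char))),
      (none : Option String)) := ⟨by simp, by intro c h; cases h⟩
  have hmain := pvFold_mirror lines (PySem.Dict.empty, none) hno hinv0
  have hfin := pvFold_inv lines (PySem.Dict.empty, none) hinv0
  rw [show pvAmk PySem.Dict.empty = PySem.Dict.empty from rfl] at hmain
  rw [hmain]
  rw [PySem.Dict.items_foldl_insert_fresh
    ((lines.foldl pvStepB (PySem.Dict.empty, none)).1.items)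
    (fun p => p.1)
    (fun p => PySem.Dict.ofList [("type", (p.2.foldl pvFieldStep (none, none)).1),
      ("color", (p.2.foldl pvFieldStep (none, none)).2)])
    PySem.Dict.empty
    (by intro a _; exact PySem.Dict.contains_empty _)
    (by exact hfin.1)]
  simp [pvAmk, pvInner, pvProcB, List.map_map, Function.comp_def, PySem.Dict.empty]
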